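-- pv_equiv track=rewrite | github.com/robertpettis/pywrangling | pywrangling/gis_functions.py | format_description
-- ===== SOURCE A (Python) =====
-- def format_description(text):
--     if not isinstance(text, str):
--         return text
--
--     formatted_text = ""
--     capitalize_next = True
--     for char in text:
--         if capitalize_next:
--             char = char.upper()
--             capitalize_next = False
--         else:
--             char = char.lower()
--         formatted_text += char
--         if char == ';':
--             capitalize_next = True
--     return formatted_text
-- ===== SOURCE B (Python) =====
-- def format_description(text):
--     if not isinstance(text, str):
--         return text
--     return ';'.join(s[:1].upper() + s[1:].lower() for s in text.split(';'))
-- ===== Notes on version B (the rewrite author's own statement) =====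
-- stated objective: faster
-- what changed: Replaced the character-by-character capitalize_next state machine building the result with string += by a split on the separator, a per-segment transform (uppercase first char, lowercase the rest), and a single join.
import Mathlib
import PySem

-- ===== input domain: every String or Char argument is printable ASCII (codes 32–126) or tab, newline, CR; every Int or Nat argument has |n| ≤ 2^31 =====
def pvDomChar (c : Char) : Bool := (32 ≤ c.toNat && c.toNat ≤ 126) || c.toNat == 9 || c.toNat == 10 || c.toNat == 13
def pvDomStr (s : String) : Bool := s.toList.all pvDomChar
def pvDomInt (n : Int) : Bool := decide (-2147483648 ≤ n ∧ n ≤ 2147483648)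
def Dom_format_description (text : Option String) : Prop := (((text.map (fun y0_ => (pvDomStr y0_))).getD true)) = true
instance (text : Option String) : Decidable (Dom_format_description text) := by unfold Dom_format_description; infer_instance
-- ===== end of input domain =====

-- B replaces A's character-by-character capitalize_next state machine by an idiomatic
-- split-on-';' / map (uppercase first char, lowercase rest) / join; equal on all inputs.


-- ===== PORT A =====
-- the for-loop over text with the accumulator (formatted_text, capitalize_next)
def fdLoopA : List Char → Bool → List Char → List Char
  | [], _, acc => acc
  | c :: rest, cap, acc =>
    let c' := if cap then PySem.Chars.upperChar c else PySem.Chars.lowerChar c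
    fdLoopA rest (c' == ';') (acc ++ [c'])

def format_description (text : Option String) : Option String :=
  match text with
  | none => none            -- not isinstance(text, str): return text
  | some s => some (String.ofList (fdLoopA s.toList true []))

-- ===== PORT B =====
-- s[:1].upper() + s[1:].lower()
def fdSeg (seg : List Char) : List Char :=
  PySem.Chars.upper (PySem.List.slice seg none (some 1)) ++
  PySem.Chars.lower (PySem.List.slice seg (some 1) none)

def format_description_alt (text : Option String) : Option String :=
  match text with
  | none => none            -- not isinstance(text, str): return text
  | some s =>
    some (String.ofList
      (PySem.Chars.join [';'] ((PySem.Chars.splitOn s.toList [';']).map fdSeg)))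

-- ===== PRECONDITION & SPEC =====
def Spec_format_description (text : Option String) (out : Option String) : Prop := out = format_description_alt text
instance (text : Option String) (out : Option String) : Decidable (Spec_format_description text out) := by unfold Spec_format_description; infer_instance

-- ===== CLAIM (what is proved, stated in full; the proofs are below) =====
def Claim_equal_format_description : Prop := ∀ (text : Option String), Dom_format_description text → Spec_format_description text (format_description text)

-- ===== LEMMAS AND PROOFS =====

/-- Simple structural model of `text.split(';')`. -/
def mySplit : List Char → List (List Char)
  | [] => [[]]
  | c :: rest =>
    if c = ';' then [] :: mySplit rest
    else
      match mySplit rest with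
      | s :: ss => (c :: s) :: ss
      | [] => [[c]]

theorem mySplit_ne_nil (l : List Char) : mySplit l ≠ [] := by
  cases l with
  | nil => simp [mySplit]
  | cons c rest =>
    simp only [mySplit]
    split
    · simp
    · split <;> simp_all

theorem upperChar_ne_semi {c : Char} (h : c ≠ ';') : PySem.Chars.upperChar c ≠ ';' := by
  unfold PySem.Chars.upperChar PySem.Chars.islower
  split
  · rename_i hc
    simp only [decide_eq_true_eq, Bool.and_eq_true] at hc
    intro he
    have h1 : 97 ≤ c.toNat := Nat.succ_le_of_lt hc.1
    have h2 : c.toNat ≤ 122 := Nat.lt_succ_iff.mp (Nat.lt_succ_of_le hc.2)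
    have h3 := congrArg Char.toNat he
    rw [Char.toNat_ofNat, if_pos (Or.inl (by omega))] at h3
    have h4 : (';' : Char).toNat = 59 := rfl
    omega
  · exact h

theorem lowerChar_ne_semi {c : Char} (h : c ≠ ';') : PySem.Chars.lowerChar c ≠ ';' := by
  unfold PySem.Chars.lowerChar PySem.Chars.isupper
  split
  · rename_i hc
    simp only [decide_eq_true_eq, Bool.and_eq_true] at hc
    intro he
    have h1 : 65 ≤ c.toNat := Nat.succ_le_of_lt hc.1
    have h2 : c.toNat ≤ 90 := Nat.lt_succ_iff.mp (Nat.lt_succ_of_le hc.2)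
    have h3 := congrArg Char.toNat he
    rw [Char.toNat_ofNat, if_pos (Or.inl (by omega))] at h3
    have h4 : (';' : Char).toNat = 59 := rfl
    omega
  · exact h

theorem join_cons_head (x : Char) (q : List Char) (ps : List (List Char)) :
    PySem.Chars.join [';'] ((x :: q) :: ps) = x :: PySem.Chars.join [';'] (q :: ps) := by
  cases ps with
  | nil => simp [PySem.Chars.join_singleton]
  | cons p ps => simp [PySem.Chars.join_cons_cons]

theorem join_nil_cons (ps : List (List Char)) (h : ps ≠ []) :
    PySem.Chars.join [';'] ([] :: ps) = ';' :: PySem.Chars.join [';'] ps := by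
  cases ps with
  | nil => simp at h
  | cons p ps => simp [PySem.Chars.join_cons_cons]

/-- fdSeg on a nonempty segment. -/
theorem fdSeg_cons (c : Char) (s : List Char) :
    fdSeg (c :: s) = PySem.Chars.upperChar c :: PySem.Chars.lower s := by
  simp [fdSeg, PySem.List.slice_to (c :: s) (b := 1) (by norm_num),
        PySem.List.slice_from (c :: s) (a := 1) (by norm_num),
        PySem.Chars.upper, PySem.Chars.lower]

theorem fdSeg_nil : fdSeg [] = [] := by
  simp [fdSeg, PySem.List.slice, PySem.Chars.upper, PySem.Chars.lower]

mutual
theorem fdLoopA_true (l : List Char) (acc : List Char) :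
    fdLoopA l true acc = acc ++ PySem.Chars.join [';'] ((mySplit l).map fdSeg) := by
  cases l with
  | nil => simp [fdLoopA, mySplit, fdSeg_nil, PySem.Chars.join_singleton]
  | cons c rest =>
    by_cases hc : c = ';'
    · subst hc
      rw [show fdLoopA (';' :: rest) true acc
            = fdLoopA rest ((';' : Char) == ';') (acc ++ [';']) from rfl]
      rw [show ((';' : Char) == ';') = true from rfl]
      rw [fdLoopA_true rest (acc ++ [';'])]
      rw [show mySplit (';' :: rest) = [] :: mySplit rest by simp [mySplit]]
      rw [List.map_cons, fdSeg_nil,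
          join_nil_cons _ (by simp [mySplit_ne_nil])]
      simp
    · have hne := upperChar_ne_semi hc
      rw [show fdLoopA (c :: rest) true acc
            = fdLoopA rest (PySem.Chars.upperChar c == ';') (acc ++ [PySem.Chars.upperChar c]) from rfl]
      rw [show (PySem.Chars.upperChar c == ';') = false from beq_eq_false_iff_ne.mpr hne]
      rw [fdLoopA_false rest (acc ++ [PySem.Chars.upperChar c])]
      obtain ⟨s, ss, hss⟩ : ∃ s ss, mySplit rest = s :: ss := by
        cases h : mySplit rest with
        | nil => exact absurd h (mySplit_ne_nil rest)
        | cons s ss => exact ⟨s, ss, rfl⟩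
      rw [show mySplit (c :: rest) = (c :: s) :: ss by simp [mySplit, hc, hss]]
      rw [List.map_cons, fdSeg_cons, join_cons_head, hss]
      simp
termination_by (l.length, 0)

theorem fdLoopA_false (l : List Char) (acc : List Char) :
    fdLoopA l false acc =
      acc ++ PySem.Chars.join [';']
        (PySem.Chars.lower (mySplit l).headI :: ((mySplit l).tail).map fdSeg) := by
  cases l with
  | nil => simp [fdLoopA, mySplit, PySem.Chars.lower, PySem.Chars.join_singleton]
  | cons c rest =>
    by_cases hc : c = ';'
    · subst hc
      rw [show fdLoopA (';' :: rest) false acc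
            = fdLoopA rest ((';' : Char) == ';') (acc ++ [';']) from rfl]
      rw [show ((';' : Char) == ';') = true from rfl]
      rw [fdLoopA_true rest (acc ++ [';'])]
      rw [show mySplit (';' :: rest) = [] :: mySplit rest by simp [mySplit]]
      simp only [List.headI, List.tail]
      rw [show PySem.Chars.lower [] = [] from rfl,
          join_nil_cons _ (by simp [mySplit_ne_nil])]
      simp
    · have hne := lowerChar_ne_semi hc
      rw [show fdLoopA (c :: rest) false acc
            = fdLoopA rest (PySem.Chars.lowerChar c == ';') (acc ++ [PySem.Chars.lowerChar c]) from rfl]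
      rw [show (PySem.Chars.lowerChar c == ';') = false from beq_eq_false_iff_ne.mpr hne]
      rw [fdLoopA_false rest (acc ++ [PySem.Chars.lowerChar c])]
      obtain ⟨s, ss, hss⟩ : ∃ s ss, mySplit rest = s :: ss := by
        cases h : mySplit rest with
        | nil => exact absurd h (mySplit_ne_nil rest)
        | cons s ss => exact ⟨s, ss, rfl⟩
      rw [show mySplit (c :: rest) = (c :: s) :: ss by simp [mySplit, hc, hss]]
      simp only [List.headI, List.tail, hss]
      rw [show PySem.Chars.lower (c :: s) = PySem.Chars.lowerChar c :: PySem.Chars.lower s from rfl,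
          join_cons_head]
      simp
termination_by (l.length, 0)
end

theorem go_spec (fuel : Nat) (l cur : List Char) (acc : List (List Char))
    (h : l.length < fuel) :
    PySem.Chars.splitOn.go [';'] fuel l cur acc =
      acc.reverse ++ ((cur.reverse ++ (mySplit l).headI) :: (mySplit l).tail) := by
  induction fuel generalizing l cur acc with
  | zero => omega
  | succ fuel ih =>
    cases l with
    | nil =>
      rw [PySem.Chars.splitOn.go.eq_def]
      simp [mySplit]
    | cons c rest =>
      rw [PySem.Chars.splitOn.go.eq_def]
      by_cases hc : c = ';'
      · subst hc
        have hp : ([';'] : List Char).isPrefixOf (';' :: rest) = true := by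
          simp [List.isPrefixOf]
        simp only [hp, if_true, List.length_cons, List.length_nil, List.drop_succ_cons,
          List.drop_zero]
        rw [ih rest [] (List.reverse cur :: acc) (by simp at h ⊢; omega)]
        obtain ⟨s, ss, hss⟩ : ∃ s ss, mySplit rest = s :: ss := by
          cases hh : mySplit rest with
          | nil => exact absurd hh (mySplit_ne_nil rest)
          | cons s ss => exact ⟨s, ss, rfl⟩
        rw [show mySplit (';' :: rest) = [] :: mySplit rest by simp [mySplit]]
        simp [hss]
      · have hp : ([';'] : List Char).isPrefixOf (c :: rest) = false := by
          rw [show (([';'] : List Char).isPrefixOf (c :: rest))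
                = ((';' == c) && (([] : List Char).isPrefixOf rest)) from rfl]
          simp only [List.isPrefixOf_nil_left, Bool.and_true, beq_eq_false_iff_ne, ne_eq]
          exact fun hh => hc hh.symm
        simp only [hp, Bool.false_eq_true, if_false]
        rw [ih rest (c :: cur) acc (by simp at h ⊢; omega)]
        obtain ⟨s, ss, hss⟩ : ∃ s ss, mySplit rest = s :: ss := by
          cases hh : mySplit rest with
          | nil => exact absurd hh (mySplit_ne_nil rest)
          | cons s ss => exact ⟨s, ss, rfl⟩
        rw [show mySplit (c :: rest) = (c :: s) :: ss by simp [mySplit, hc, hss]]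
        simp [hss]


theorem splitOn_eq_mySplit (l : List Char) :
    PySem.Chars.splitOn l [';'] = mySplit l := by
  unfold PySem.Chars.splitOn
  rw [go_spec (l.length + 1) l [] [] (by omega)]
  cases h : mySplit l with
  | nil => exact absurd h (mySplit_ne_nil l)
  | cons s ss => simp

-- ===== VERDICT (by name: the statement is the Claim_ definition above) =====
theorem format_description_spec : Claim_equal_format_description := by
  intro text _
  unfold Spec_format_description
  cases text with
  | none => rfl
  | some s =>
    simp only [format_description, format_description_alt, splitOn_eq_mySplit]
    rw [fdLoopA_true s.toList []]
    simp
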